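-- pv_equiv track=rewrite | github.com/pm1100tm/Algorithm | programmers/level_1/lv_1_027_덧칠하기.py | solution
-- ===== SOURCE A (Python) =====
-- def solution(n: int, m: int, section: list[int]) -> int:
--     roller_count = 0
--     index = 0
--
--     while index < len(section):
--         roller_count += 1
--         start = section[index]
--
--         while index < len(section) and section[index] < start + m:
--             index += 1
--
--     return roller_count
-- ===== SOURCE B (Python) =====
-- def solution(n: int, m: int, section: list[int]) -> int:
--     # Balanced divide-and-conquer: solve each half recursively, threading the
--     # (count, painted-end) state from the left half into the right half.
--     def go(lo, hi, count, end):
--         if hi - lo == 1: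
--             x = section[lo]
--             if end is None or x >= end:
--                 return count + 1, x + m
--             return count, end
--         mid = (lo + hi) // 2
--         count, end = go(lo, mid, count, end)
--         return go(mid, hi, count, end)
--
--     if not section:
--         return 0
--     return go(0, len(section), 0, None)[0]
-- ===== Notes on version B (the rewrite author's own statement) =====
-- stated objective: alternative
-- what changed: Replaced A's nested index-advancing while-loops with a balanced divide-and-conquer recursion that splits the array in halves and threads the (count, painted-end) state from the left half into the right half; O(log n) recursion depth, same O(n) work.
import Mathlib
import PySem

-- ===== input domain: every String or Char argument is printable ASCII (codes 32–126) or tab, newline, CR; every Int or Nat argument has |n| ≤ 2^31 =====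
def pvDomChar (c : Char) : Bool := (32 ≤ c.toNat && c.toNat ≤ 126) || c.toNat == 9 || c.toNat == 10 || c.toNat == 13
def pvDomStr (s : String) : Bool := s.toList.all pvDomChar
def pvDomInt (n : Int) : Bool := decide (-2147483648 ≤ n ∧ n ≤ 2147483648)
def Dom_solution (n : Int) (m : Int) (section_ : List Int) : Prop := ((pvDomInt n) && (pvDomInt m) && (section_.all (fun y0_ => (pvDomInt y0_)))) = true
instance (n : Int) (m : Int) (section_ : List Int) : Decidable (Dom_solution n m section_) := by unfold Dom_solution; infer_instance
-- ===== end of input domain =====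

-- B replaces A's nested index-advancing while-loops with a balanced divide-and-conquer
-- recursion splitting the array in halves and threading the (count, painted-end) state
-- (objective: alternative).

-- ===== PORT A =====
-- inner while: `while index < len(section) and section[index] < start + m: index += 1`
def skipA (section_ : List Int) (bound : Int) (index : Nat) : Nat :=
  if h : index < section_.length then
    if section_[index] < bound then skipA section_ bound (index + 1) else index
  else index
termination_by section_.length - index
decreasing_by omega

-- outer while; fuel makes the (inside Pre_ unreachable) non-advancing case total
def outerA (section_ : List Int) (m : Int) : Nat → Nat → Int → Int
  | 0, _, count => count
  | fuel + 1, index, count =>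
    if h : index < section_.length then
      outerA section_ m fuel (skipA section_ (section_[index] + m) index) (count + 1)
    else count

def solution (n : Int) (m : Int) (section_ : List Int) : Int :=
  outerA section_ m (section_.length + 1) 0 0

-- ===== PORT B =====
-- `go(lo, hi, count, end)`; the `hi ≤ lo + 1` guard only makes the (never-called)
-- `hi = lo` case total, Python writes `hi - lo == 1`; section_[lo] is always in range
-- at the calls made, the `none` default branch is unreachable there.
def goB (m : Int) (section_ : List Int) (lo hi : Nat) (st : Int × Option Int) : Int × Option Int :=
  if hi ≤ lo + 1 then
    match PySem.List.pyGet? section_ (lo : Int) with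
    | none => st
    | some x =>
      match st.2 with
      | none => (st.1 + 1, some (x + m))
      | some e => if e ≤ x then (st.1 + 1, some (x + m)) else st
  else
    let mid := (lo + hi) / 2
    let st' := goB m section_ lo mid st
    goB m section_ mid hi st'
termination_by hi - lo
decreasing_by all_goals omega

def solution_alt (n : Int) (m : Int) (section_ : List Int) : Int :=
  if section_ = [] then 0
  else (goB m section_ 0 section_.length (0, none)).1

-- ===== PRECONDITION & SPEC =====
-- Pre_ excludes m ≤ 0 with a nonempty section: there A's inner while never advances the
-- index and the outer loop runs forever (A diverges, returning no value).
def Pre_solution (n : Int) (m : Int) (section_ : List Int) : Prop := 0 < m ∨ section_ = []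
instance (n : Int) (m : Int) (section_ : List Int) : Decidable (Pre_solution n m section_) := by unfold Pre_solution; infer_instance
def pvWitness_solution : Int × Int × List Int := (8, 4, [2, 4, 1, 7])
def Spec_solution (n : Int) (m : Int) (section_ : List Int) (out : Int) : Prop := out = solution_alt n m section_
instance (n : Int) (m : Int) (section_ : List Int) (out : Int) : Decidable (Spec_solution n m section_ out) := by unfold Spec_solution; infer_instance

-- ===== CLAIM (what is proved, stated in full; the proofs are below) =====
def Claim_equal_solution : Prop := ∀ (n : Int) (m : Int) (section_ : List Int), Dom_solution n m section_ → Pre_solution n m section_ → Spec_solution n m section_ (solution n m section_)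

-- ===== LEMMAS AND PROOFS =====

-- the per-element state transition both formulations make
def stepB (m : Int) (st : Int × Option Int) (x : Int) : Int × Option Int :=
  match st.2 with
  | none => (st.1 + 1, some (x + m))
  | some e => if e ≤ x then (st.1 + 1, some (x + m)) else st

-- common greedy specification both loops compute
def greedy (m : Int) : List Int → Int
  | [] => 0
  | x :: xs => 1 + greedy m (xs.dropWhile (fun y => decide (y < x + m)))
termination_by l => l.length
decreasing_by
  simpa using Nat.lt_succ_of_le (List.length_dropWhile_le _ _)

lemma skipA_drop (section_ : List Int) (bound : Int) (index : Nat) :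
    section_.drop (skipA section_ bound index)
      = (section_.drop index).dropWhile (fun y => decide (y < bound)) := by
  unfold skipA
  split
  · rename_i h
    rw [List.drop_eq_getElem_cons h]
    split
    · rename_i hlt
      rw [List.dropWhile_cons_of_pos (by simpa using hlt)]
      exact skipA_drop section_ bound (index + 1)
    · rename_i hge
      rw [List.dropWhile_cons_of_neg (by simpa using hge)]
      exact List.drop_eq_getElem_cons h
  · rename_i h
    rw [List.drop_eq_nil_of_le (by omega)]
    rfl
termination_by section_.length - index
decreasing_by omega

lemma outerA_greedy (section_ : List Int) (m : Int) (hm : 0 < m) :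
    ∀ (fuel index : Nat) (count : Int),
      (section_.drop index).length + 1 ≤ fuel →
      outerA section_ m fuel index count = count + greedy m (section_.drop index) := by
  intro fuel
  induction fuel with
  | zero => intro index count h; omega
  | succ fuel ih =>
    intro index count hfuel
    by_cases h : index < section_.length
    · have hdrop := List.drop_eq_getElem_cons h
      have hskip := skipA_drop section_ (section_[index] + m) index
      have hhead : (section_.drop index).dropWhile (fun y => decide (y < section_[index] + m))
          = (section_.drop (index + 1)).dropWhile (fun y => decide (y < section_[index] + m)) := by
        rw [hdrop, List.dropWhile_cons_of_pos (by simp; omega)]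
      have hlen : (section_.drop (skipA section_ (section_[index] + m) index)).length + 1 ≤ fuel := by
        rw [hskip, hhead]
        have := List.length_dropWhile_le (fun y => decide (y < section_[index] + m)) (section_.drop (index + 1))
        simp only [List.length_drop] at *
        omega
      have hg : greedy m (section_.drop index)
          = 1 + greedy m (section_.drop (skipA section_ (section_[index] + m) index)) := by
        rw [hskip, hhead]
        conv_lhs => rw [hdrop]
        rw [greedy]
      rw [outerA, dif_pos h, ih _ _ hlen, hg]
      ring
    · rw [outerA, dif_neg h, List.drop_eq_nil_of_le (by omega), greedy]
      ring

-- B's divide-and-conquer computes the left-to-right fold of stepB over the segment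
lemma goB_foldl (m : Int) (section_ : List Int) :
    ∀ (lo hi : Nat) (st : Int × Option Int), lo < hi → hi ≤ section_.length →
      goB m section_ lo hi st
        = ((section_.drop lo).take (hi - lo)).foldl (stepB m) st := by
  intro lo hi
  induction hhi : hi - lo using Nat.strong_induction_on generalizing lo hi with
  | _ d ih =>
    intro st hlt hle
    subst hhi
    unfold goB
    by_cases h1 : hi ≤ lo + 1
    · have hhi1 : hi = lo + 1 := by omega
      have hlo : lo < section_.length := by omega
      have hget : PySem.List.pyGet? section_ (lo : Int) = some section_[lo] := by
        simp [PySem.List.pyGet?, PySem.List.pyIdx?, hlo]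
      rw [if_pos h1, hget, hhi1]
      have h11 : lo + 1 - lo = 1 := by omega
      have htake : (section_.drop lo).take (lo + 1 - lo) = [section_[lo]] := by
        rw [h11, List.drop_eq_getElem_cons hlo, List.take_succ_cons, List.take_zero]
      rw [htake]
      simp only [List.foldl_cons, List.foldl_nil, stepB]
    · rw [if_neg h1]
      show goB m section_ ((lo + hi) / 2) hi (goB m section_ lo ((lo + hi) / 2) st) = _
      have hmidlo : lo < (lo + hi) / 2 := by omega
      have hmidhi : (lo + hi) / 2 < hi := by omega
      rw [ih ((lo + hi) / 2 - lo) (by omega) lo _ rfl st hmidlo (by omega),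
          ih (hi - (lo + hi) / 2) (by omega) _ hi rfl _ hmidhi hle]
      have hsplit : (section_.drop lo).take (hi - lo)
          = (section_.drop lo).take ((lo + hi) / 2 - lo)
            ++ (section_.drop ((lo + hi) / 2)).take (hi - (lo + hi) / 2) := by
        have h2 : hi - lo = ((lo + hi) / 2 - lo) + (hi - (lo + hi) / 2) := by omega
        have h3 : lo + ((lo + hi) / 2 - lo) = (lo + hi) / 2 := by omega
        rw [h2, List.take_add, List.drop_drop, h3]
      rw [hsplit, List.foldl_append]

lemma foldB_some (m : Int) :
    ∀ (l : List Int) (c e : Int),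
      (l.foldl (stepB m) (c, some e)).1
        = c + greedy m (l.dropWhile (fun y => decide (y < e))) := by
  intro l
  induction l with
  | nil => intro c e; simp [greedy]
  | cons x xs ih =>
    intro c e
    by_cases hx : e ≤ x
    · rw [List.dropWhile_cons_of_neg (by simpa using hx)]
      simp only [List.foldl_cons, stepB, if_pos hx]
      rw [ih, greedy]
      ring
    · rw [List.dropWhile_cons_of_pos (by simp; omega)]
      simp only [List.foldl_cons, stepB, if_neg hx]
      exact ih c e

lemma alt_greedy (n m : Int) (section_ : List Int) :
    solution_alt n m section_ = greedy m section_ := by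
  cases section_ with
  | nil => simp [solution_alt, greedy]
  | cons x xs =>
    unfold solution_alt
    rw [if_neg (by simp)]
    rw [goB_foldl m (x :: xs) 0 (x :: xs).length (0, none) (by simp) (le_refl _)]
    simp only [List.drop_zero, Nat.sub_zero, List.take_length, List.foldl_cons, stepB]
    rw [foldB_some, greedy]
    ring

-- ===== VERDICT (by name: the statement is the Claim_ definition above) =====
theorem solution_spec : Claim_equal_solution := by
  intro n m section_ _ hpre
  unfold Spec_solution
  rcases hpre with hm | hnil
  · rw [alt_greedy]
    unfold solution
    rw [outerA_greedy section_ m hm (section_.length + 1) 0 0 (by simp)]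
    simp
  · subst hnil; rfl
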